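-- pv_equiv track=rewrite | github.com/aviswerdlow/k4 | archive/03_SOLVERS/v5_2/scripts/run_confirm_v5_2_strict.py | apply_anchors_to_plaintext
-- ===== SOURCE A (Python) =====
-- ANCHOR_POSITIONS = {
--     "EAST": (21, 24),
--     "NORTHEAST": (25, 33),
--     "BERLIN": (63, 68),
--     "CLOCK": (69, 73)
-- }
--
-- def apply_anchors_to_plaintext(head: str) -> str:
--     """
--     Apply anchors at their fixed positions to create full 97-char plaintext.
--     This is what would be tested for lawfulness.
--     """
--
--     # Pad to 97 chars
--     full_text = head + " " * (97 - len(head))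
--     full_text = full_text[:97]
--
--     # Convert to list for modification
--     chars = list(full_text)
--
--     # Apply anchors at their positions
--     for anchor, (start, end) in ANCHOR_POSITIONS.items():
--         anchor_len = end - start + 1
--         if start < len(chars):
--             for i, c in enumerate(anchor):
--                 if start + i < len(chars):
--                     chars[start + i] = c
--
--     return ''.join(chars)
-- ===== SOURCE B (Python) =====
-- ANCHOR_POSITIONS = {
--     "EAST": (21, 24),
--     "NORTHEAST": (25, 33),
--     "BERLIN": (63, 68),
--     "CLOCK": (69, 73)
-- }
--
-- def apply_anchors_to_plaintext(head: str) -> str: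
--     # Pad/truncate to exactly 97 chars.
--     full = (head + " " * (97 - len(head)))[:97]
--     # Build a position -> character overlay index once.
--     overlay = {}
--     for anchor, (start, _end) in ANCHOR_POSITIONS.items():
--         for i, c in enumerate(anchor):
--             overlay[start + i] = c
--     # One uniform pass over all 97 positions.
--     return ''.join(overlay.get(i, full[i]) for i in range(97))
-- ===== Notes on version B (the rewrite author's own statement) =====
-- stated objective: alternative
-- what changed: Replaces per-anchor in-place mutation of a char list (with per-character bounds checks) by building a position->char overlay dict once and producing the result in a single uniform pass over range(97).
import Mathlib
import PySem

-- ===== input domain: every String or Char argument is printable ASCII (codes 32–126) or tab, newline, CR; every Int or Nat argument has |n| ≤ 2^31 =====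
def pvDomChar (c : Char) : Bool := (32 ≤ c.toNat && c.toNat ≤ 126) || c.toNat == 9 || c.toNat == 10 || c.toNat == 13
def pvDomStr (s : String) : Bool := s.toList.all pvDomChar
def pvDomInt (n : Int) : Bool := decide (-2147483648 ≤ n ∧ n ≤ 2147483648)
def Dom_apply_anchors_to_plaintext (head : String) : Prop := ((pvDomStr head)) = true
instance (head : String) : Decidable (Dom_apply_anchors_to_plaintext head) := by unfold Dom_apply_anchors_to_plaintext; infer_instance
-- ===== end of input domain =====

-- B replaces A's per-anchor in-place list mutation by a position→char overlay dict plus one uniform pass over range(97) (alternative decomposition, same cost).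

-- The module constant ANCHOR_POSITIONS (a dict iterated in insertion order), shared by both ports.
def pvAnchors : List (String × (Int × Int)) :=
  [("EAST", (21, 24)), ("NORTHEAST", (25, 33)), ("BERLIN", (63, 68)), ("CLOCK", (69, 73))]

-- ===== PORT A =====
def apply_anchors_to_plaintext (head : String) : String :=
  let full_text := head.toList ++ List.replicate (97 - head.toList.length) ' '
  let full_text := full_text.take 97
  let chars := full_text
  let chars := pvAnchors.foldl (fun chars asse =>
    let start := asse.2.1
    let _anchor_len := asse.2.2 - start + 1
    if start < (chars.length : Int) then
      (PySem.List.enumerate asse.1.toList).foldl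
        (fun chars ic =>
          if start + ic.1 < (chars.length : Int) then
            chars.set (start + ic.1).toNat ic.2   -- chars[start+i] = c; start+i ≥ 0 here, so toNat is exact
          else chars)
        chars
    else chars) chars
  String.ofList chars

-- ===== PORT B =====
def apply_anchors_to_plaintext_alt (head : String) : String :=
  let full := (head.toList ++ List.replicate (97 - head.toList.length) ' ').take 97
  let overlay := pvAnchors.foldl (fun d ass =>
      (PySem.List.enumerate ass.1.toList).foldl
        (fun d ic => d.insert (ass.2.1 + ic.1) ic.2) d)
    (PySem.Dict.empty : PySem.Dict Int Char)
  String.ofList ((PySem.List.pyRange 0 97 1).map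
    (fun i => (overlay.get? i).getD (PySem.List.pyGetD full i ' ')))   -- full[i]: 0 ≤ i < 97 = len(full), so the default is never used

-- ===== PRECONDITION & SPEC =====
def Spec_apply_anchors_to_plaintext (head : String) (out : String) : Prop := out = apply_anchors_to_plaintext_alt head
instance (head : String) (out : String) : Decidable (Spec_apply_anchors_to_plaintext head out) := by unfold Spec_apply_anchors_to_plaintext; infer_instance

-- ===== CLAIM (what is proved, stated in full; the proofs are below) =====
def Claim_equal_apply_anchors_to_plaintext : Prop := ∀ (head : String), Dom_apply_anchors_to_plaintext head → Spec_apply_anchors_to_plaintext head (apply_anchors_to_plaintext head)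

-- ===== LEMMAS AND PROOFS =====

-- The 24 (absolute index, anchor character) pairs written out by anchor, in A's write order.
def pvPairs : List (Nat × Char) :=
  [(21,'E'),(22,'A'),(23,'S'),(24,'T'),(25,'N'),(26,'O'),(27,'R'),(28,'T'),(29,'H'),(30,'E'),(31,'A'),(32,'S'),(33,'T'),
   (63,'B'),(64,'E'),(65,'R'),(66,'L'),(67,'I'),(68,'N'),(69,'C'),(70,'L'),(71,'O'),(72,'C'),(73,'K')]

-- A's anchor loop, as a function of the padded 97-char list.
def pvSet (L : List Char) : List Char :=
  pvAnchors.foldl (fun chars asse =>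
    let start := asse.2.1
    let _anchor_len := asse.2.2 - start + 1
    if start < (chars.length : Int) then
      (PySem.List.enumerate asse.1.toList).foldl
        (fun chars ic =>
          if start + ic.1 < (chars.length : Int) then
            chars.set (start + ic.1).toNat ic.2
          else chars)
        chars
    else chars) L

-- B's overlay dict and final pass, as a function of the padded 97-char list.
def pvOverlay : PySem.Dict Int Char :=
  pvAnchors.foldl (fun d ass =>
      (PySem.List.enumerate ass.1.toList).foldl
        (fun d ic => d.insert (ass.2.1 + ic.1) ic.2) d)
    (PySem.Dict.empty : PySem.Dict Int Char)

def pvMap (L : List Char) : List Char :=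
  (PySem.List.pyRange 0 97 1).map (fun i => (pvOverlay.get? i).getD (PySem.List.pyGetD L i ' '))

theorem pv_len_foldl_set (ps : List (Nat × Char)) (l : List Char) :
    (ps.foldl (fun l p => l.set p.1 p.2) l).length = l.length := by
  induction ps generalizing l with
  | nil => rfl
  | cons q ps ih => simp [List.foldl_cons, ih]

-- An index-wise reading of a left fold of List.set: the LAST write to position i wins.
theorem pv_getElem?_foldl_set (ps : List (Nat × Char)) (l : List Char) (i : Nat) :
    (ps.foldl (fun l p => l.set p.1 p.2) l)[i]? =
      match ps.reverse.find? (fun p => p.1 == i) with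
      | some p => if i < l.length then some p.2 else none
      | none => l[i]? := by
  induction ps using List.reverseRecOn generalizing l with
  | nil => simp
  | append_singleton ps q ih =>
      rw [List.foldl_append]
      simp only [List.foldl_cons, List.foldl_nil]
      rw [List.getElem?_set]
      rw [List.reverse_append, List.reverse_singleton, List.singleton_append, List.find?_cons]
      by_cases hq : q.1 = i
      · simp [hq, pv_len_foldl_set]
      · have hb : (q.1 == i) = false := by simp [hq]
        rw [if_neg hq, hb, ih]

-- B's dict lookup and the last-write-wins reading of A's writes agree on every index of the text.
set_option maxRecDepth 20000 in
theorem pv_lookup_eq : ∀ i : Nat, i < 97 →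
    pvOverlay.get? (i : Int) = (pvPairs.reverse.find? (fun p => p.1 == i)).map Prod.snd := by
  decide

-- A's anchor loop on a 97-char list IS the fold of the 24 individual writes.
set_option maxHeartbeats 1000000 in
theorem pvSet_eq (L : List Char) (h : L.length = 97) :
    pvSet L = pvPairs.foldl (fun l p => l.set p.1 p.2) L := by
  simp only [pvSet, pvAnchors, List.foldl_cons, List.foldl_nil]
  simp only [pvPairs, List.foldl_cons, List.foldl_nil]
  simp [PySem.List.enumerate, h]

set_option maxHeartbeats 1000000 in
theorem pv_core (L : List Char) (h : L.length = 97) : pvSet L = pvMap L := by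
  rw [pvSet_eq L h]
  apply List.ext_getElem?
  intro i
  rw [pv_getElem?_foldl_set]
  simp only [pvMap]
  by_cases hi : i < 97
  · rw [show (97:Int) = ((97:Nat):Int) from by norm_num]
    rw [PySem.List.getElem?_map_pyRange_zero _ _ _ hi]
    rw [pv_lookup_eq i hi]
    cases hf : pvPairs.reverse.find? (fun p => p.1 == i) with
    | none =>
        have hL : i < L.length := by omega
        simp [PySem.List.pyGetD_natCast, List.getD_eq_getElem?_getD, List.getElem?_eq_getElem hL]
    | some p => simp [h, hi]
  · have h2 : (((PySem.List.pyRange 0 97 1).map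
        (fun i => (pvOverlay.get? i).getD (PySem.List.pyGetD L i ' '))).length) ≤ i := by
      simp [PySem.List.length_pyRange_one]; omega
    rw [List.getElem?_eq_none h2]
    cases hf : pvPairs.reverse.find? (fun p => p.1 == i) <;>
      simp [h, hi]

theorem pv_full_len (head : String) :
    ((head.toList ++ List.replicate (97 - head.toList.length) ' ').take 97).length = 97 := by
  simp [List.length_take]
  omega

-- ===== VERDICT (by name: the statement is the Claim_ definition above) =====
theorem apply_anchors_to_plaintext_spec : Claim_equal_apply_anchors_to_plaintext := by
  intro head _
  show apply_anchors_to_plaintext head = apply_anchors_to_plaintext_alt head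
  exact congrArg String.ofList (pv_core _ (pv_full_len head))
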